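-- pv_equiv track=rewrite | github.com/steveyoung-random/cassiel-legal-workbench | registry/resolution.py | _best_section_match
-- ===== SOURCE A (Python) =====
-- from typing import Any, Dict, List, Optional, Tuple
--
-- def _is_valid_prefix(cited: str, candidate: str) -> bool:
--     """
--     Check whether candidate is a valid prefix of cited.
--
--     A prefix is valid if, at position len(candidate) in cited, the next
--     character is either:
--       - a separator: '.', '-', or '_', or
--       - a different character class from the last character of candidate
--         (digit→letter or letter→digit).
--
--     Same-class continuation (e.g. digit→digit) is NOT valid: "23" should
--     not match section "234" because "4" continues the same digit class as "3".
--
--     Exact match (len(cited) == len(candidate)) is always valid.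
--     Empty candidate is never valid.
--     """
--     if not candidate:
--         return False
--     if not cited.startswith(candidate):
--         return False
--     if len(cited) == len(candidate):
--         return True  # exact match
--     next_char = cited[len(candidate)]
--     prev_char = candidate[-1]
--     if next_char in '.-_':
--         return True
--     return prev_char.isdigit() != next_char.isdigit()
--
-- def _best_section_match(cited: str, candidates: List[str]) -> Optional[str]:
--     """
--     Find the best matching candidate for cited.
--
--     Returns the longest candidate that is a valid prefix of cited,
--     or None if no candidate matches.  Longer matches are more specific:
--     "2000a" beats "2000" as a match for "2000a-4".
--     """
--     best: Optional[str] = None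
--     best_len = -1
--     for candidate in candidates:
--         if _is_valid_prefix(cited, candidate) and len(candidate) > best_len:
--             best = candidate
--             best_len = len(candidate)
--     return best
-- ===== SOURCE B (Python) =====
-- from typing import List, Optional
--
-- def _best_section_match(cited: str, candidates: List[str]) -> Optional[str]:
--     """Scan cut positions of cited from longest to shortest instead of scanning
--     the candidate list: a position k is a valid cut iff it is the end of cited,
--     is followed by a separator, or sits on a digit/letter class change; the
--     first (longest) valid cut whose prefix is in the candidate set wins."""
--     cand_set = set(candidates)
--     n = len(cited)
--     for k in range(n, 0, -1):
--         if (k == n or cited[k] in '.-_'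
--                 or cited[k - 1].isdigit() != cited[k].isdigit()) and cited[:k] in cand_set:
--             return cited[:k]
--     return None
-- ===== Notes on version B (the rewrite author's own statement) =====
-- stated objective: alternative
-- what changed: Instead of testing each candidate with _is_valid_prefix and tracking the best length, B builds a set of the candidates once and walks the cut positions of cited from longest to shortest, returning the first position that is a valid cut and whose prefix is in the set.
import Mathlib
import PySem

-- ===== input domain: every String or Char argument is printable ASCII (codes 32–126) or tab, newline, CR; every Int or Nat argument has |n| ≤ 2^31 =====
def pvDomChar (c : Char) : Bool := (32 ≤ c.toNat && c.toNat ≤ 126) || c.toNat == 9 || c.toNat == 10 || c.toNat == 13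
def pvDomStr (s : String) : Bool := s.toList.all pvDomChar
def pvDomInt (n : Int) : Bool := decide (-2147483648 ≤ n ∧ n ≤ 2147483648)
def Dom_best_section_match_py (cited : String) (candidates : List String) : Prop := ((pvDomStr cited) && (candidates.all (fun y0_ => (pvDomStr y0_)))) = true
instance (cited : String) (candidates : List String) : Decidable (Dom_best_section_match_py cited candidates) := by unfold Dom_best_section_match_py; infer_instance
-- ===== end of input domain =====

-- B scans the cut positions of `cited` from longest to shortest against a set of the candidates,
-- instead of testing every candidate with the prefix predicate (alternative algorithm, same results).


-- ===== PORT A =====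
-- helper _is_valid_prefix of Source A
def is_valid_prefix_py (cited : String) (candidate : String) : Bool :=
  if candidate.toList.isEmpty then false
  else if !(PySem.Str.startswith cited candidate) then false
  else if PySem.Str.len cited = PySem.Str.len candidate then true
  else
    -- both indexings are in range here (candidate nonempty, a proper prefix of cited),
    -- so the `none` fallback branches are unreachable
    match PySem.Str.pyGet? cited (PySem.Str.len candidate), PySem.Str.pyGet? candidate (-1) with
    | some next_char, some prev_char =>
        if ['.', '-', '_'].contains next_char then true
        else PySem.Chars.isdigit prev_char != PySem.Chars.isdigit next_char
    | _, _ => false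

def best_section_match_py (cited : String) (candidates : List String) : Option String :=
  (candidates.foldl
    (fun (st : Option String × Int) candidate =>
      if is_valid_prefix_py cited candidate && decide (PySem.Str.len candidate > st.2)
      then (some candidate, PySem.Str.len candidate)
      else st)
    (none, -1)).1

-- ===== PORT B =====
-- the parenthesised cut test of Source B: k == n or cited[k] in '.-_' or class change at k
def bsm_cut (cited : String) (k : Int) : Bool :=
  decide (k = PySem.Str.len cited) ||
  (match PySem.Str.pyGet? cited k with
   | some nc =>
       ['.', '-', '_'].contains nc ||
       (match PySem.Str.pyGet? cited (k - 1) with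
        | some pc => PySem.Chars.isdigit pc != PySem.Chars.isdigit nc
        | none => false)     -- unreachable: 1 ≤ k in the loop
   | none => false)          -- unreachable: the loop only reaches this with k < len(cited)

-- the for-loop of Source B with its early return
def bsm_scan (cited : String) (cset : PySem.Set String) : List Int → Option String
  | [] => none
  | k :: ks =>
      if bsm_cut cited k && PySem.Set.contains cset (PySem.Str.slice cited none (some k))
      then some (PySem.Str.slice cited none (some k))
      else bsm_scan cited cset ks

def best_section_match_py_alt (cited : String) (candidates : List String) : Option String :=
  bsm_scan cited (PySem.Set.ofList candidates)
    (PySem.List.pyRange (PySem.Str.len cited) 0 (-1))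

-- ===== PRECONDITION & SPEC =====
def Spec_best_section_match_py (cited : String) (candidates : List String) (out : Option String) : Prop := out = best_section_match_py_alt cited candidates
instance (cited : String) (candidates : List String) (out : Option String) : Decidable (Spec_best_section_match_py cited candidates out) := by unfold Spec_best_section_match_py; infer_instance

-- ===== CLAIM (what is proved, stated in full; the proofs are below) =====
def Claim_equal_best_section_match_py : Prop := ∀ (cited : String) (candidates : List String), Dom_best_section_match_py cited candidates → Spec_best_section_match_py cited candidates (best_section_match_py cited candidates)

-- ===== LEMMAS AND PROOFS =====

-- the prefix cited[:k] for a natural k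
def pvPref (cited : String) (k : Nat) : String := PySem.Str.slice cited none (some (k : Int))

theorem pvPref_toList (cited : String) (k : Nat) : (pvPref cited k).toList = cited.toList.take k := by
  simp [pvPref, pysem]

-- the loop condition of Source B at a natural position k
def pvCond (cited : String) (cset : PySem.Set String) (k : Nat) : Bool :=
  bsm_cut cited (k : Int) && PySem.Set.contains cset (pvPref cited k)

-- tag of A's accumulator: best_len is -1 for none, len s for some s
def pvTag : Option String → Int
  | none => -1
  | some s => PySem.Str.len s

-- A's accumulator step, restricted to the valid candidates
def pvStep (a : Option String) (x : String) : Option String :=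
  match a with
  | none => some x
  | some m => if PySem.Str.len m < PySem.Str.len x then some x else some m

-- A's fold from a tagged state equals a first-max fold over the filtered list
theorem pv_fold_eq (cited : String) (l : List String) (acc : Option String) :
    l.foldl
      (fun (st : Option String × Int) candidate =>
        if is_valid_prefix_py cited candidate && decide (PySem.Str.len candidate > st.2)
        then (some candidate, PySem.Str.len candidate)
        else st)
      (acc, pvTag acc)
    = (let m := (l.filter (fun c => is_valid_prefix_py cited c)).foldl pvStep acc
       (m, pvTag m)) := by
  induction l generalizing acc with
  | nil => simp
  | cons c t ih =>
    by_cases hv : is_valid_prefix_py cited c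
    · have hstep :
          (if is_valid_prefix_py cited c && decide (PySem.Str.len c > pvTag acc)
           then (some c, PySem.Str.len c) else (acc, pvTag acc))
          = (pvStep acc c, pvTag (pvStep acc c)) := by
        cases acc with
        | none =>
          have hlen : (-1:Int) < (c.length : Int) := by omega
          simp [hv, pvTag, pvStep, gt_iff_lt, hlen]
        | some m =>
          simp only [hv, pvTag, pvStep, gt_iff_lt, Bool.true_and, decide_eq_true_eq]
          split_ifs <;> simp
      simp only [List.foldl_cons]
      rw [hstep, List.filter_cons, if_pos (by simp [hv]), List.foldl_cons]
      exact ih _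
    · simp only [List.foldl_cons, List.filter_cons, hv]
      simpa [hv] using ih acc

-- characterisation of A's validity test: candidate is a nonempty take-prefix whose length is a valid cut
theorem pv_valid_iff (cited c : String) :
    is_valid_prefix_py cited c = true ↔
      (1 ≤ c.toList.length ∧ c.toList = cited.toList.take c.toList.length ∧
       bsm_cut cited (c.toList.length : Int) = true) := by
  by_cases hne : c.toList = []
  · simp [is_valid_prefix_py, hne]
  · have hne' : c.toList.isEmpty = false := by simp [hne]
    have hk1 : 1 ≤ c.toList.length := by
      have := List.length_pos_of_ne_nil hne; omega
    by_cases hpre : PySem.Str.startswith cited c = true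
    case neg =>
      have hnt : ¬ (c.toList = cited.toList.take c.toList.length) := by
        intro h
        exact hpre (by
          rw [PySem.Str.startswith_eq]
          exact (PySem.Chars.startswith_iff _ _).mpr (List.prefix_iff_eq_take.mpr h))
      have hpreCf : PySem.Chars.startswith cited.toList c.toList = false := by
        revert hpre
        rw [PySem.Str.startswith_eq]
        cases PySem.Chars.startswith cited.toList c.toList <;> simp
      have hL : is_valid_prefix_py cited c = false := by
        unfold is_valid_prefix_py
        rw [if_neg (by simp [hne']), if_pos (by simp [hpreCf])]
      rw [hL]
      constructor
      · intro h; exact absurd h (by simp)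
      · rintro ⟨-, h, -⟩; exact absurd h hnt
    case pos =>
      have hpreC : PySem.Chars.startswith cited.toList c.toList = true := by
        rw [← PySem.Str.startswith_eq]; exact hpre
      have hpre' : c.toList <+: cited.toList := (PySem.Chars.startswith_iff _ _).mp hpreC
      have htake : c.toList = cited.toList.take c.toList.length := List.prefix_iff_eq_take.mp hpre'
      have hle : c.toList.length ≤ cited.toList.length := hpre'.length_le
      by_cases heqn : c.toList.length = cited.toList.length
      · have hlenB : PySem.Str.len cited = PySem.Str.len c := by
          rw [PySem.Str.len_eq, PySem.Str.len_eq]; omega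
        have hcut : bsm_cut cited ((c.toList.length : Int)) = true := by
          unfold bsm_cut
          rw [decide_eq_true (by rw [PySem.Str.len_eq]; omega)]
          rfl
        have hL : is_valid_prefix_py cited c = true := by
          unfold is_valid_prefix_py
          rw [if_neg (by simp [hne']), if_neg (by simp [hpreC]), if_pos hlenB]
        rw [hL]
        exact iff_of_true rfl ⟨hk1, htake, hcut⟩
      · have hk : c.toList.length < cited.toList.length := by omega
        have hlen : ¬ (PySem.Str.len cited = PySem.Str.len c) := by
          rw [PySem.Str.len_eq, PySem.Str.len_eq]
          intro h; exact heqn (by exact_mod_cast h.symm)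
        have ekm : c.toList.length - 1 < cited.toList.length := by omega
        have ekc : c.toList.length - 1 < c.toList.length := by omega
        have e1 : PySem.Str.pyGet? cited (PySem.Str.len c)
            = some (cited.toList[c.toList.length]'hk) := by
          rw [PySem.Str.len_eq, PySem.Str.pyGet?_natCast]
          exact List.getElem?_eq_getElem hk
        have e2 : PySem.Str.pyGet? c (-1) = some (cited.toList[c.toList.length - 1]'ekm) := by
          have h0 : PySem.Str.pyGet? c (-1) = c.toList.getLast? := by
            simp [pysem, PySem.List.pyGet?_neg_one]
          rw [h0, List.getLast?_eq_getElem?, List.getElem?_eq_getElem ekc]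
          exact congrArg some (hpre'.getElem ekc)
        have e4 : PySem.Str.pyGet? cited ((c.toList.length : Int))
            = some (cited.toList[c.toList.length]'hk) := by
          rw [PySem.Str.pyGet?_natCast]
          exact List.getElem?_eq_getElem hk
        have e5 : PySem.Str.pyGet? cited ((c.toList.length : Int) - 1)
            = some (cited.toList[c.toList.length - 1]'ekm) := by
          rw [show ((c.toList.length : Int) - 1) = ((c.toList.length - 1 : Nat) : Int) by omega,
            PySem.Str.pyGet?_natCast]
          exact List.getElem?_eq_getElem ekm
        have hLexp : is_valid_prefix_py cited c
            = (['.', '-', '_'].contains (cited.toList[c.toList.length]'hk) ||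
               (PySem.Chars.isdigit (cited.toList[c.toList.length - 1]'ekm) !=
                PySem.Chars.isdigit (cited.toList[c.toList.length]'hk))) := by
          unfold is_valid_prefix_py
          rw [if_neg (by simp [hne']), if_neg (by simp [hpreC]), if_neg hlen, e1, e2]
          simp [Bool.if_true_left]
        have hRexp : bsm_cut cited ((c.toList.length : Int))
            = (['.', '-', '_'].contains (cited.toList[c.toList.length]'hk) ||
               (PySem.Chars.isdigit (cited.toList[c.toList.length - 1]'ekm) !=
                PySem.Chars.isdigit (cited.toList[c.toList.length]'hk))) := by
          unfold bsm_cut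
          rw [decide_eq_false (by
            rw [PySem.Str.len_eq]; intro h; exact heqn (by exact_mod_cast h)), e4, e5]
          simp
        rw [hLexp, hRexp]
        exact ⟨fun h => ⟨hk1, htake, h⟩, fun ⟨_, _, h⟩ => h⟩

-- Source B's loop condition holds at k (1 ≤ k ≤ n) iff cited[:k] is a valid candidate
theorem pv_cond_iff (cited : String) (candidates : List String) (k : Nat)
    (hk1 : 1 ≤ k) (hkn : k ≤ cited.toList.length) :
    pvCond cited (PySem.Set.ofList candidates) k = true ↔
      (pvPref cited k ∈ candidates ∧ is_valid_prefix_py cited (pvPref cited k) = true) := by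
  have hlenp : (pvPref cited k).toList.length = k := by
    rw [pvPref_toList, List.length_take]; omega
  have hvalid : is_valid_prefix_py cited (pvPref cited k) = true ↔ bsm_cut cited (k : Int) = true := by
    rw [pv_valid_iff, hlenp]
    exact ⟨fun ⟨_, _, h⟩ => h, fun h => ⟨hk1, by rw [pvPref_toList], h⟩⟩
  unfold pvCond
  rw [Bool.and_eq_true]
  constructor
  · rintro ⟨h1, h2⟩
    exact ⟨by simpa [pysem] using h2, hvalid.mpr h1⟩
  · rintro ⟨hm, hv⟩
    exact ⟨hvalid.mp hv, by simpa [pysem] using hm⟩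

-- scan over a descending range returns none when no position qualifies
theorem pv_scan_none (cited : String) (cset : PySem.Set String) :
    ∀ a : Nat, (∀ k : Nat, 1 ≤ k → k ≤ a → pvCond cited cset k = false) →
      bsm_scan cited cset (PySem.List.pyRange (a : Int) 0 (-1)) = none := by
  intro a
  induction a with
  | zero =>
    intro _
    rw [PySem.List.pyRange_neg_one_eq_nil (by norm_num)]
    rfl
  | succ a ih =>
    intro h
    rw [PySem.List.pyRange_neg_one_cons (by exact_mod_cast Nat.succ_pos a)]
    have hc : pvCond cited cset (a + 1) = false := h (a + 1) (by omega) (le_refl _)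
    simp only [pvCond, pvPref] at hc
    push_cast at hc
    have hcast : ((a + 1 : Nat) : Int) - 1 = (a : Int) := by push_cast; ring
    simp only [bsm_scan, hcast]
    push_cast
    rw [if_neg (by rw [hc]; simp), ih (fun k h1 h2 => h k h1 (by omega))]

-- scan over a descending range returns the greatest qualifying position
theorem pv_scan_find (cited : String) (cset : PySem.Set String) :
    ∀ a K : Nat, 1 ≤ K → K ≤ a → pvCond cited cset K = true →
      (∀ k : Nat, K < k → k ≤ a → pvCond cited cset k = false) →
      bsm_scan cited cset (PySem.List.pyRange (a : Int) 0 (-1)) = some (pvPref cited K) := by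
  intro a
  induction a with
  | zero => intro K h1 h2; omega
  | succ a ih =>
    intro K h1 h2 hK hmax
    rw [PySem.List.pyRange_neg_one_cons (by exact_mod_cast Nat.succ_pos a)]
    have hcast : ((a + 1 : Nat) : Int) - 1 = (a : Int) := by push_cast; ring
    simp only [bsm_scan, hcast]
    push_cast
    by_cases hKa : K = a + 1
    · subst hKa
      simp only [pvCond, pvPref] at hK
      push_cast at hK
      rw [if_pos hK]
      simp [pvPref]
    · have hc : pvCond cited cset (a + 1) = false := hmax (a + 1) (by omega) (le_refl _)
      simp only [pvCond, pvPref] at hc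
      push_cast at hc
      rw [if_neg (by rw [hc]; simp)]
      exact ih K h1 (by omega) hK (fun k hk1 hk2 => hmax k hk1 (by omega))

-- running maximum of candidate lengths, as B's scan start
def pvMaxLen (v : List String) (j : Nat) : Nat := v.foldl (fun m c => Nat.max m c.toList.length) j

theorem pv_le_maxLen : ∀ (v : List String) (j : Nat), j ≤ pvMaxLen v j := by
  intro v
  induction v with
  | nil => intro j; exact le_refl j
  | cons c t ih =>
    intro j
    calc j ≤ Nat.max j c.toList.length := Nat.le_max_left _ _
      _ ≤ pvMaxLen t (Nat.max j c.toList.length) := ih _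
      _ = pvMaxLen (c :: t) j := rfl

theorem pv_maxLen_mem : ∀ (v : List String) (j : Nat),
    pvMaxLen v j = j ∨ ∃ c ∈ v, pvMaxLen v j = c.toList.length := by
  intro v
  induction v with
  | nil => intro j; exact Or.inl rfl
  | cons c t ih =>
    intro j
    rcases ih (Nat.max j c.toList.length) with h | ⟨d, hd, hdl⟩
    · rcases Nat.le_total c.toList.length j with hle | hle
      · left; calc pvMaxLen (c :: t) j = pvMaxLen t (Nat.max j c.toList.length) := rfl
          _ = Nat.max j c.toList.length := h
          _ = j := Nat.max_eq_left hle
      · right; exact ⟨c, List.mem_cons_self, by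
          calc pvMaxLen (c :: t) j = pvMaxLen t (Nat.max j c.toList.length) := rfl
            _ = Nat.max j c.toList.length := h
            _ = c.toList.length := Nat.max_eq_right hle⟩
    · right; exact ⟨d, List.mem_cons_of_mem _ hd, hdl⟩

theorem pv_maxLen_ub : ∀ (v : List String) (j : Nat) (c : String), c ∈ v →
    c.toList.length ≤ pvMaxLen v j := by
  intro v
  induction v with
  | nil => intro j c hc; cases hc
  | cons d t ih =>
    intro j c hc
    rcases List.mem_cons.mp hc with rfl | hc
    · calc c.toList.length ≤ Nat.max j c.toList.length := Nat.le_max_right _ _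
        _ ≤ pvMaxLen t _ := pv_le_maxLen _ _
        _ = pvMaxLen (c :: t) j := rfl
    · exact ih _ c hc

-- folding A's step from a prefix accumulator tracks the running maximum length
theorem pv_mx_from (cited : String) : ∀ (v : List String) (j : Nat),
    j ≤ cited.toList.length →
    (∀ c ∈ v, c.toList = cited.toList.take c.toList.length) →
    v.foldl pvStep (some (pvPref cited j)) = some (pvPref cited (pvMaxLen v j)) := by
  intro v
  induction v with
  | nil => intro j _ _; rfl
  | cons c t ih =>
    intro j hj hv
    have htc : c.toList = cited.toList.take c.toList.length := hv c List.mem_cons_self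
    have hcle : c.toList.length ≤ cited.toList.length := by
      have := congrArg List.length htc
      rw [List.length_take] at this
      omega
    have hlj : PySem.Str.len (pvPref cited j) = (j : Int) := by
      rw [PySem.Str.len_eq, pvPref_toList, List.length_take]
      omega
    have hstep : pvStep (some (pvPref cited j)) c
        = some (pvPref cited (Nat.max j c.toList.length)) := by
      show (if PySem.Str.len (pvPref cited j) < PySem.Str.len c then some c
            else some (pvPref cited j)) = _
      rw [hlj, PySem.Str.len_eq]
      by_cases hlt : j < c.toList.length
      · rw [if_pos (by exact_mod_cast hlt)]
        congr 1
        apply String.toList_inj.mp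
        have hm : Nat.max j c.toList.length = c.toList.length :=
          Nat.max_eq_right (Nat.le_of_lt hlt)
        rw [pvPref_toList, hm]
        exact htc
      · have hm : Nat.max j c.toList.length = j :=
          Nat.max_eq_left (Nat.le_of_not_lt hlt)
        rw [if_neg (by exact_mod_cast hlt), hm]
    calc (c :: t).foldl pvStep (some (pvPref cited j))
        = t.foldl pvStep (pvStep (some (pvPref cited j)) c) := rfl
      _ = t.foldl pvStep (some (pvPref cited (Nat.max j c.toList.length))) := by rw [hstep]
      _ = some (pvPref cited (pvMaxLen t (Nat.max j c.toList.length))) :=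
          ih _ (Nat.max_le.mpr ⟨hj, hcle⟩) (fun d hd => hv d (List.mem_cons_of_mem _ hd))
      _ = some (pvPref cited (pvMaxLen (c :: t) j)) := rfl

-- ===== VERDICT (by name: the statement is the Claim_ definition above) =====
theorem best_section_match_py_spec : Claim_equal_best_section_match_py := by
  intro cited candidates _
  show best_section_match_py cited candidates = best_section_match_py_alt cited candidates
  unfold best_section_match_py best_section_match_py_alt
  rw [show ((none : Option String), (-1 : Int)) = (none, pvTag none) from rfl,
    pv_fold_eq cited candidates none, PySem.Str.len_eq]
  show (candidates.filter (fun c => is_valid_prefix_py cited c)).foldl pvStep none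
      = bsm_scan cited (PySem.Set.ofList candidates)
          (PySem.List.pyRange ((cited.toList.length : Int)) 0 (-1))
  have hvmem : ∀ c ∈ candidates.filter (fun c => is_valid_prefix_py cited c),
      c ∈ candidates ∧ (1 ≤ c.toList.length ∧ c.toList = cited.toList.take c.toList.length ∧
        bsm_cut cited ((c.toList.length : Int)) = true) := by
    intro c hc
    rcases List.mem_filter.mp hc with ⟨hm, hval⟩
    exact ⟨hm, (pv_valid_iff cited c).mp hval⟩
  cases hvv : candidates.filter (fun c => is_valid_prefix_py cited c) with
  | nil =>
    symm
    apply pv_scan_none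
    intro k hk1 hkn
    by_contra hcond
    have hcond' : pvCond cited (PySem.Set.ofList candidates) k = true := by
      revert hcond; cases pvCond cited (PySem.Set.ofList candidates) k <;> simp
    rcases (pv_cond_iff cited candidates k hk1 hkn).mp hcond' with ⟨hm, hval⟩
    have : pvPref cited k ∈ candidates.filter (fun c => is_valid_prefix_py cited c) :=
      List.mem_filter.mpr ⟨hm, hval⟩
    rw [hvv] at this
    cases this
  | cons c0 t =>
    have hc0v : c0 ∈ candidates.filter (fun c => is_valid_prefix_py cited c) := by
      rw [hvv]; exact List.mem_cons_self
    rcases hvmem c0 hc0v with ⟨hc0m, hl0, htk0, hcut0⟩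
    have hc0n : c0.toList.length ≤ cited.toList.length := by
      have := congrArg List.length htk0
      rw [List.length_take] at this
      omega
    have hc0p : c0 = pvPref cited c0.toList.length :=
      String.toList_inj.mp (by rw [pvPref_toList, ← htk0])
    have hmx : t.foldl pvStep (some c0) = some (pvPref cited (pvMaxLen t c0.toList.length)) := by
      rw [show (some c0) = some (pvPref cited c0.toList.length) from congrArg some hc0p]
      exact pv_mx_from cited t c0.toList.length hc0n
        (fun d hd => ((hvmem d (by rw [hvv]; exact List.mem_cons_of_mem _ hd)).2).2.1)
    have hub : ∀ c ∈ candidates.filter (fun c => is_valid_prefix_py cited c),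
        c.toList.length ≤ pvMaxLen t c0.toList.length := by
      intro c hc
      rw [hvv] at hc
      rcases List.mem_cons.mp hc with rfl | hc
      · exact pv_le_maxLen _ _
      · exact pv_maxLen_ub _ _ _ hc
    -- the maximum is realised by some valid candidate
    have hKrep : ∃ c ∈ candidates.filter (fun c => is_valid_prefix_py cited c),
        pvMaxLen t c0.toList.length = c.toList.length := by
      rcases pv_maxLen_mem t c0.toList.length with h | ⟨d, hd, hdl⟩
      · exact ⟨c0, hc0v, h⟩
      · exact ⟨d, by rw [hvv]; exact List.mem_cons_of_mem _ hd, hdl⟩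
    rcases hKrep with ⟨cK, hcKv, hKlen⟩
    rcases hvmem cK hcKv with ⟨hcKm, hK1, htkK, hcutK⟩
    have hKn : cK.toList.length ≤ cited.toList.length := by
      have := congrArg List.length htkK
      rw [List.length_take] at this
      omega
    have hcKp : cK = pvPref cited cK.toList.length :=
      String.toList_inj.mp (by rw [pvPref_toList, ← htkK])
    have hcondK : pvCond cited (PySem.Set.ofList candidates) cK.toList.length = true := by
      rw [pv_cond_iff cited candidates _ hK1 hKn]
      refine ⟨by rw [← hcKp]; exact hcKm, ?_⟩
      rw [← hcKp]
      exact (List.mem_filter.mp hcKv).2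
    have hmaxK : ∀ k : Nat, cK.toList.length < k → k ≤ cited.toList.length →
        pvCond cited (PySem.Set.ofList candidates) k = false := by
      intro k hgt hkn
      by_contra hcond
      have hcond' : pvCond cited (PySem.Set.ofList candidates) k = true := by
        revert hcond; cases pvCond cited (PySem.Set.ofList candidates) k <;> simp
      rcases (pv_cond_iff cited candidates k (by omega) hkn).mp hcond' with ⟨hm, hval⟩
      have hmem : pvPref cited k ∈ candidates.filter (fun c => is_valid_prefix_py cited c) :=
        List.mem_filter.mpr ⟨hm, hval⟩
      have hlen : (pvPref cited k).toList.length = k := by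
        rw [pvPref_toList, List.length_take]; omega
      have := hub _ hmem
      rw [hlen, hKlen] at this
      omega
    calc (c0 :: t).foldl pvStep none
        = t.foldl pvStep (some c0) := rfl
      _ = some (pvPref cited (pvMaxLen t c0.toList.length)) := hmx
      _ = some (pvPref cited cK.toList.length) := by rw [hKlen]
      _ = bsm_scan cited (PySem.Set.ofList candidates)
            (PySem.List.pyRange ((cited.toList.length : Int)) 0 (-1)) := by
          symm
          exact pv_scan_find cited (PySem.Set.ofList candidates) cited.toList.length
            cK.toList.length hK1 hKn hcondK hmaxK
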